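-- pv_equiv track=rewrite | github.com/WangWenQiang/wwq_web | util/stage_judge.py | development_period
-- ===== SOURCE A (Python) =====
-- def development_period(info):
--     order_list = order_info_dict(info)
--     # 六项中有三项分数>50
--     if len([k for k, v in info.items() if v > 50]) == 3:
--         stage_flag1 = True
--     else:
--         return False
--
--     # 亲密、沟通、尊重、承诺有两项在前三
--     if len(order_list) <= 3:
--         stage_flag2 = True
--     else:
--         # 取出分数前三的所有
--         tmp_values = list(order_list[0].values())[0] + list(order_list[1].values())[0] + list(order_list[2].values())[0]
--         rule_four = 0
--         tmp_list = ['亲密度', '沟通力', '尊重值', '承诺值']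
--         for tmp in tmp_list:
--             if tmp in tmp_values:
--                 rule_four += 1
--
--         # 是否有两项
--         if rule_four == 2:
--             stage_flag2 = True
--         else:
--             stage_flag2 = False
--     return stage_flag1 and stage_flag2
--
-- def order_info_dict(info):
--     """
--     按照分数排名, 可能会出现分数相同情况
--     :param info:
--     :return:
--     """
--     tmp_dict = {}
--     for k, v in info.items():
--         tmp_k = tmp_dict.get(v, [])
--         tmp_k.append(k)
--         tmp_dict[v] = tmp_k
--     return [{k: tmp_dict[k]} for k in sorted(tmp_dict.keys(), reverse=True)]
-- ===== SOURCE B (Python) =====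
-- def development_period(info):
--     values = list(info.values())
--     if sum(1 for v in values if v > 50) != 3:
--         return False
--     distinct = set(values)
--     if len(distinct) <= 3:
--         return True
--     hits = 0
--     for tag in ('亲密度', '沟通力', '尊重值', '承诺值'):
--         v = info.get(tag)
--         if v is not None and sum(1 for d in distinct if d > v) <= 2:
--             hits += 1
--     return hits == 2
-- ===== Notes on version B (the rewrite author's own statement) =====
-- stated objective: simpler
-- what changed: B never sorts or groups: A builds a score->keys dict, sorts the distinct scores, concatenates the top-three key groups and scans the four tag names against that list; B counts scores>50 and distinct scores directly and, for each of the four tags, looks its score up with info.get(tag) and deems it top-three iff at most two distinct scores exceed it (rank by counting instead of sort-and-slice).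
import Mathlib
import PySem

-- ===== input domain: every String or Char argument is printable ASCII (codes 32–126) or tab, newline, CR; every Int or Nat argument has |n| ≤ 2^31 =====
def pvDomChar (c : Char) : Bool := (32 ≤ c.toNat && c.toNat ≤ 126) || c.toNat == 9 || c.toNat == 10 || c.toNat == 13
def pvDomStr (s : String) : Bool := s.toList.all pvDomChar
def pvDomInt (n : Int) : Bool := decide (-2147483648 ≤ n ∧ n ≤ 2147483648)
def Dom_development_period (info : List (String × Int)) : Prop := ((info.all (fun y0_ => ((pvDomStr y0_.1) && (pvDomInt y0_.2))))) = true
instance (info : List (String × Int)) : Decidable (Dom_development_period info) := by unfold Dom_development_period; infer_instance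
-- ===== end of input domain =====

-- B never sorts or groups: it replaces A's group-by-score dict and sorted top-three concatenation
-- by rank-by-counting (a tag's score is top-three iff at most two distinct scores exceed it),
-- looked up directly with info.get(tag) — simpler, no helper.
-- The dict argument is materialised as PySem.Dict.ofList info (last value wins on duplicate keys), as Python's dict(info) would.

-- ===== PORT A =====
def order_info_dict (items : List (String × Int)) : List (List (Int × List String)) :=
  let tmp_dict := items.foldl
    (fun d kv => d.modify kv.2 ([] : List String) (fun l => l ++ [kv.1])) PySem.Dict.empty
  (PySem.List.sorted tmp_dict.keys (fun k => k) true).map (fun k => [(k, tmp_dict.getD k [])])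
  -- tmp_dict[k] ported as getD k []: exact, k ranges over tmp_dict's keys

def development_period (info : List (String × Int)) : Bool :=
  let items := (PySem.Dict.ofList info).items
  let order_list := order_info_dict items
  if ((items.filter (fun kv => decide (kv.2 > 50))).map (·.1)).length = 3 then
    let stage_flag1 := true
    let stage_flag2 :=
      if order_list.length ≤ 3 then true
      else
        -- order_list[i] ported as pyGetD _ i []: exact, this branch has order_list.length > 3
        let tmp_values :=
          PySem.List.pyGetD ((PySem.List.pyGetD order_list 0 []).map (·.2)) 0 []
          ++ PySem.List.pyGetD ((PySem.List.pyGetD order_list 1 []).map (·.2)) 0 []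
          ++ PySem.List.pyGetD ((PySem.List.pyGetD order_list 2 []).map (·.2)) 0 []
        let tmp_list : List String := ["亲密度", "沟通力", "尊重值", "承诺值"]
        let rule_four : Int :=
          tmp_list.foldl (fun acc tmp => if tmp_values.contains tmp then acc + 1 else acc) 0
        if rule_four = 2 then true else false
    stage_flag1 && stage_flag2
  else false

-- ===== PORT B =====
def development_period_alt (info : List (String × Int)) : Bool :=
  let d := PySem.Dict.ofList info
  let values := d.values
  if values.countP (fun v => decide (v > 50)) ≠ 3 then false
  else
    let distinct := PySem.Set.ofList values
    if PySem.List.len distinct ≤ 3 then true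
    else
      let hits : Int := (["亲密度", "沟通力", "尊重值", "承诺值"] : List String).foldl
        (fun acc tag =>
          if (d.get? tag).any (fun v => decide (distinct.countP (fun x => decide (x > v)) ≤ 2))
          then acc + 1 else acc) 0
      decide (hits = 2)


-- ===== PRECONDITION & SPEC =====
def Spec_development_period (info : List (String × Int)) (out : Bool) : Prop := out = development_period_alt info
instance (info : List (String × Int)) (out : Bool) : Decidable (Spec_development_period info out) := by unfold Spec_development_period; infer_instance

-- ===== CLAIM (what is proved, stated in full; the proofs are below) =====
def Claim_equal_development_period : Prop := ∀ (info : List (String × Int)), Dom_development_period info → Spec_development_period info (development_period info)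

-- ===== LEMMAS AND PROOFS =====

theorem rank_iff (a b c : Int) (r : List Int)
    (hp : (a :: b :: c :: r).Pairwise (fun x y => x > y)) (v : Int)
    (hv : v ∈ a :: b :: c :: r) :
    (v = a ∨ v = b ∨ v = c) ↔
      (a :: b :: c :: r).countP (fun x => decide (x > v)) ≤ 2 := by
  simp only [List.pairwise_cons] at hp
  obtain ⟨ha, hb, hc, -⟩ := hp
  simp only [List.mem_cons, forall_eq_or_imp] at ha hb
  obtain ⟨hab, hac, har⟩ := ha
  obtain ⟨hbc, hbr⟩ := hb
  simp only [List.mem_cons] at hv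
  simp only [List.countP_cons]
  rcases hv with rfl | rfl | rfl | hvr
  · have : r.countP (fun x => decide (x > v)) = 0 :=
      List.countP_eq_zero.mpr (fun x hx => by simp; linarith [har x hx])
    simp [this]; split_ifs <;> omega
  · have : r.countP (fun x => decide (x > v)) = 0 :=
      List.countP_eq_zero.mpr (fun x hx => by simp; linarith [hbr x hx])
    simp [this]; split_ifs <;> omega
  · have : r.countP (fun x => decide (x > v)) = 0 :=
      List.countP_eq_zero.mpr (fun x hx => by simp; linarith [hc x hx])
    simp [this]; split_ifs <;> omega
  · have h1 : a > v := har v hvr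
    have h2 : b > v := hbr v hvr
    have h3 : c > v := hc v hvr
    constructor
    · rintro (rfl | rfl | rfl) <;> omega
    · intro h; exfalso; simp [h1, h2, h3] at h

theorem contains_top3_iff {d : PySem.Dict String Int} (hnd : d.keys.Nodup)
    (a b c : Int) (r : List Int)
    (hL : PySem.List.sorted (PySem.Set.ofList (d.items.map (·.2))) (fun k => k) true
        = a :: b :: c :: r) (t : String) :
    (((d.items.filter (fun kv => kv.2 == a)).map (·.1)
      ++ (d.items.filter (fun kv => kv.2 == b)).map (·.1)
      ++ (d.items.filter (fun kv => kv.2 == c)).map (·.1)).contains t)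
    = (d.get? t).any (fun v =>
        decide ((PySem.Set.ofList (d.items.map (·.2))).countP (fun x => decide (x > v)) ≤ 2)) := by
  set items := d.items with hitems
  set S := PySem.Set.ofList (items.map (·.2)) with hS
  have hperm : (a :: b :: c :: r).Perm S := by
    have := PySem.List.sorted_perm S (fun k => k) true
    rwa [hL] at this
  have hgt : (a :: b :: c :: r).Pairwise (fun x y => x > y) := by
    have h1 := PySem.List.sorted_pairwise_rev S (fun k => k) (κ := Int)
    rw [hL] at h1
    have h2 : (a :: b :: c :: r).Nodup := hperm.nodup_iff.mpr (PySem.Set.nodup_ofList _)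
    exact (h1.and h2).imp (fun hx => lt_of_le_of_ne hx.1 (Ne.symm hx.2))
  have hcp : ∀ v, S.countP (fun x => decide (x > v))
      = (a :: b :: c :: r).countP (fun x => decide (x > v)) :=
    fun v => (hperm.countP_eq _).symm
  have hmemL : ∀ u : String,
      u ∈ ((items.filter (fun kv => kv.2 == a)).map (·.1)
        ++ (items.filter (fun kv => kv.2 == b)).map (·.1)
        ++ (items.filter (fun kv => kv.2 == c)).map (·.1))
      ↔ ∃ v, (u, v) ∈ items ∧ (v = a ∨ v = b ∨ v = c) := by
    intro u
    simp only [List.mem_append, List.mem_map, List.mem_filter, beq_iff_eq]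
    constructor
    · rintro ((⟨⟨k, v⟩, ⟨hm, hv⟩, rfl⟩ | ⟨⟨k, v⟩, ⟨hm, hv⟩, rfl⟩) | ⟨⟨k, v⟩, ⟨hm, hv⟩, rfl⟩)
      · exact ⟨v, hm, Or.inl hv⟩
      · exact ⟨v, hm, Or.inr (Or.inl hv)⟩
      · exact ⟨v, hm, Or.inr (Or.inr hv)⟩
    · rintro ⟨v, hm, rfl | rfl | rfl⟩
      · exact Or.inl (Or.inl ⟨(u, v), ⟨hm, rfl⟩, rfl⟩)
      · exact Or.inl (Or.inr ⟨(u, v), ⟨hm, rfl⟩, rfl⟩)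
      · exact Or.inr ⟨(u, v), ⟨hm, rfl⟩, rfl⟩
  rcases hg : d.get? t with _ | v
  · rw [List.contains_eq_mem, Option.any_none, decide_eq_false_iff_not]
    intro hmem
    obtain ⟨v, hm, -⟩ := (hmemL t).mp hmem
    have he : d.get? t = some v := (PySem.Dict.get?_eq_some_iff_mem_items d _ _ hnd).mpr hm
    rw [hg] at he
    cases he
  · rw [List.contains_eq_mem, Option.any_some, decide_eq_decide]
    rw [hmemL t]
    have hvm : (t, v) ∈ items := PySem.Dict.mem_items_of_get?_eq_some d hg
    constructor
    · rintro ⟨v', hm', hv'⟩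
      have he : d.get? t = some v' := (PySem.Dict.get?_eq_some_iff_mem_items d _ _ hnd).mpr hm'
      rw [hg] at he
      injection he with e
      subst e
      have hvmem : v ∈ a :: b :: c :: r := by
        rcases hv' with rfl | rfl | rfl <;> simp
      rw [hcp v]
      exact (rank_iff a b c r hgt v hvmem).mp hv'
    · intro hle
      have hvL : v ∈ a :: b :: c :: r :=
        hperm.mem_iff.mpr ((PySem.Set.mem_ofList _ _).mpr (List.mem_map.mpr ⟨(t, v), hvm, rfl⟩))
      exact ⟨v, hvm, (rank_iff a b c r hgt v hvL).mpr (by rw [← hcp v]; exact hle)⟩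

theorem group_content (items : List (String × Int)) (c : Int) :
    (items.foldl (fun d kv => PySem.Dict.modify d kv.2 ([] : List String) (fun l => l ++ [kv.1]))
      PySem.Dict.empty).getD c [] = (items.filter (fun kv => kv.2 == c)).map (·.1) := by
  have h := PySem.Dict.getD_foldl_modify_append (items.map Prod.swap) PySem.Dict.empty c
  rw [List.foldl_map] at h
  simpa [List.filter_map, Function.comp, Prod.swap] using h

theorem group_keys (items : List (String × Int)) :
    (items.foldl (fun d kv => PySem.Dict.modify d kv.2 ([] : List String) (fun l => l ++ [kv.1]))
      PySem.Dict.empty).keys = PySem.Set.ofList (items.map (·.2)) := by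
  have h := PySem.Dict.keys_foldl_modify_key items (·.2) ([] : List String)
      (fun _ kv => fun l => l ++ [kv.1]) PySem.Dict.empty
  simpa [PySem.Set.update_nil_left] using h


theorem main_eq (info : List (String × Int)) :
    development_period info = development_period_alt info := by
  simp only [development_period, development_period_alt, order_info_dict, group_keys,
    group_content, PySem.Dict.values]
  generalize hd : PySem.Dict.ofList info = d
  have hnd : d.keys.Nodup := hd ▸ PySem.Dict.nodup_keys_ofList info
  have hfc : (List.filter (fun kv => decide (kv.2 > 50)) d.items).length
      = List.countP (fun v => decide (v > 50)) (d.items.map (·.2)) := by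
    simp [List.countP_map, ← List.countP_eq_length_filter, Function.comp_def]
  by_cases h3 : List.countP (fun v => decide (v > 50)) (d.items.map (·.2)) = 3
  · have hA3 : (List.map (fun x => x.1)
        (List.filter (fun kv => decide (kv.2 > 50)) d.items)).length = 3 := by
      rw [List.length_map, hfc]; exact h3
    rw [if_pos hA3, if_neg (not_not_intro h3), Bool.true_and, List.length_map]
    have hlenL : (PySem.List.sorted (PySem.Set.ofList (List.map (fun x => x.2) d.items))
        (fun k => k) true).length
        = (PySem.Set.ofList (List.map (fun x => x.2) d.items)).length :=
      (PySem.List.sorted_perm _ _ _).length_eq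
    by_cases hlen : (PySem.Set.ofList (List.map (fun x => x.2) d.items)).length ≤ 3
    · rw [if_pos (by omega : (PySem.List.sorted (PySem.Set.ofList (List.map (fun x => x.2) d.items)) (fun k => k) true).length ≤ 3),
        if_pos (show PySem.List.len (PySem.Set.ofList (List.map (fun x => x.2) d.items)) ≤ 3 by rw [PySem.List.len_eq]; exact_mod_cast hlen)]
    · rw [if_neg (by omega : ¬ (PySem.List.sorted (PySem.Set.ofList (List.map (fun x => x.2) d.items)) (fun k => k) true).length ≤ 3),
        if_neg (show ¬ PySem.List.len (PySem.Set.ofList (List.map (fun x => x.2) d.items)) ≤ 3 by rw [PySem.List.len_eq]; exact_mod_cast hlen)]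
      obtain ⟨a, b, c, r, hD⟩ : ∃ a b c r,
          PySem.List.sorted (PySem.Set.ofList (List.map (fun x => x.2) d.items))
            (fun k => k) true = a :: b :: c :: r := by
        rcases hx : PySem.List.sorted (PySem.Set.ofList (List.map (fun x => x.2) d.items))
            (fun k => k) true with _ | ⟨a, _ | ⟨b, _ | ⟨c, r⟩⟩⟩ <;>
          first
          | exact ⟨a, b, c, r, hx⟩
          | (exfalso; rw [hx] at hlenL; simp at hlenL; omega)
      rw [hD]
      simp only [List.map_cons, PySem.List.pyGetD_ofNat', List.getD_cons_zero,
        List.getD_cons_succ]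
      simp only [PySem.List.foldl_if_add_one]
      have hc : List.countP
            (fun tmp => ((d.items.filter (fun kv => kv.2 == a)).map (·.1)
              ++ (d.items.filter (fun kv => kv.2 == b)).map (·.1)
              ++ (d.items.filter (fun kv => kv.2 == c)).map (·.1)).contains tmp)
            ["亲密度", "沟通力", "尊重值", "承诺值"]
          = List.countP
            (fun tag => (d.get? tag).any (fun v =>
              decide ((PySem.Set.ofList (d.items.map (·.2))).countP
                (fun x => decide (x > v)) ≤ 2)))
            ["亲密度", "沟通力", "尊重值", "承诺值"] :=
        List.countP_congr (fun t _ => by rw [contains_top3_iff hnd a b c r hD t])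
      have hbfold : List.foldl
            (fun acc tag => if (d.get? tag).any (fun v =>
              decide ((PySem.Set.ofList (d.items.map (·.2))).countP
                (fun x => decide (x > v)) ≤ 2)) then acc + 1 else acc)
            (0 : Int) ["亲密度", "沟通力", "尊重值", "承诺值"]
          = 0 + ((["亲密度", "沟通力", "尊重值", "承诺值"].countP
            (fun tag => (d.get? tag).any (fun v =>
              decide ((PySem.Set.ofList (d.items.map (·.2))).countP
                (fun x => decide (x > v)) ≤ 2)))) : Int) :=
        PySem.List.foldl_if_add_one _ _ _
      have hiff : (0 + ((List.countP
            (fun tmp => ((d.items.filter (fun kv => kv.2 == a)).map (·.1)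
              ++ (d.items.filter (fun kv => kv.2 == b)).map (·.1)
              ++ (d.items.filter (fun kv => kv.2 == c)).map (·.1)).contains tmp)
            ["亲密度", "沟通力", "尊重值", "承诺值"]) : Int) = 2)
          ↔ (List.foldl
            (fun acc tag => if (d.get? tag).any (fun v =>
              decide ((PySem.Set.ofList (d.items.map (·.2))).countP
                (fun x => decide (x > v)) ≤ 2)) then acc + 1 else acc)
            (0 : Int) ["亲密度", "沟通力", "尊重值", "承诺值"] = 2) := by
        rw [hbfold, hc]
      by_cases h2 : 0 + ((List.countP
            (fun tmp => ((d.items.filter (fun kv => kv.2 == a)).map (·.1)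
              ++ (d.items.filter (fun kv => kv.2 == b)).map (·.1)
              ++ (d.items.filter (fun kv => kv.2 == c)).map (·.1)).contains tmp)
            ["亲密度", "沟通力", "尊重值", "承诺值"]) : Int) = 2
      · rw [if_pos h2]
        exact (decide_eq_true (hiff.mp h2)).symm
      · rw [if_neg h2]
        exact (decide_eq_false (fun hh => h2 (hiff.mpr hh))).symm
  · rw [if_neg (by rw [List.length_map, hfc]; exact h3), if_pos (by exact h3)]

-- ===== VERDICT (by name: the statement is the Claim_ definition above) =====
theorem development_period_spec : Claim_equal_development_period := by
  intro info _
  exact main_eq info
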